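-- pv_equiv track=rewrite | github.com/Olabayoji/Hurricane-Analysis-Codecademy- | script.py | hurricane_count
-- ===== SOURCE A (Python) =====
-- def hurricane_count(areas_affected):
--   occurrence_count = {}
--   for occurrences in areas_affected:
--     for state in occurrences:
--       if state in occurrence_count:
--         occurrence_count[state] += 1
--       elif state not in occurrence_count:
--         occurrence_count[state] = 1
--   return occurrence_count
-- ===== SOURCE B (Python) =====
-- def hurricane_count(areas_affected):
--   flat = [state for occurrences in areas_affected for state in occurrences]
--   fs = sorted(flat)
--   counts = {}
--   i = 0
--   while i < len(fs):
--     j = i + 1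
--     while j < len(fs) and fs[j] == fs[i]:
--       j += 1
--     counts[fs[i]] = j - i
--     i = j
--   return {state: counts[state] for state in dict.fromkeys(flat)}
-- ===== Notes on version B (the rewrite author's own statement) =====
-- stated objective: alternative
-- what changed: Replaces A's incremental membership-test-and-increment dict loop with flatten once, sort, a run-length scan over the sorted list, and a final reorder to first-occurrence order via dict.fromkeys.
import Mathlib
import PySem

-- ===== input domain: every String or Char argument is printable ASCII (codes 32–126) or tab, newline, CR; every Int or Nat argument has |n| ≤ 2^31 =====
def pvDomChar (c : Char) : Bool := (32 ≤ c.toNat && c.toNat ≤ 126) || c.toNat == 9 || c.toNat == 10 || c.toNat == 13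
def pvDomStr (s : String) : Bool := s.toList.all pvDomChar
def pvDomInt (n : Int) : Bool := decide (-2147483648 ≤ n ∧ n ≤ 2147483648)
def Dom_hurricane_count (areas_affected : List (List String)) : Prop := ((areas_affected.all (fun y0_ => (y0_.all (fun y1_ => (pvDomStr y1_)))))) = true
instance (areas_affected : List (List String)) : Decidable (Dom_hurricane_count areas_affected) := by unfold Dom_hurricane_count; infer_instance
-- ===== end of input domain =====

-- B replaces A's incremental dict counting with flatten → sort → run-length scan, reordered to first-occurrence order; same return value.

-- ===== PORT A =====
-- A: build a dict, incrementing when the key is present, inserting 1 otherwise.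
def hurricane_count (areas_affected : List (List String)) : List (String × Int) :=
  (areas_affected.foldl (fun occurrence_count occurrences =>
      occurrences.foldl (fun occurrence_count state =>
        if occurrence_count.contains state then
          occurrence_count.modify state 0 (· + 1)          -- occurrence_count[state] += 1
        else if !(occurrence_count.contains state) then
          occurrence_count.insert state 1                  -- occurrence_count[state] = 1
        else occurrence_count) occurrence_count)
    (PySem.Dict.empty : PySem.Dict String Int)).items

-- ===== PORT B =====
-- B's outer while loop over the sorted list: each step scans one run fs[i..j) of equal
-- elements (the inner 'while fs[j] == fs[i]' = takeWhile/dropWhile) and records its length.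
def rleCounts (fs : List String) (counts : PySem.Dict String Int) : PySem.Dict String Int :=
  match fs with
  | [] => counts
  | x :: t =>
    rleCounts (t.dropWhile (fun y => y == x))
      (counts.insert x (1 + ((t.takeWhile (fun y => y == x)).length : Int)))
termination_by fs.length
decreasing_by
  simpa using Nat.lt_succ_of_le (List.length_dropWhile_le _ t)

-- B: flat = [state for occurrences in areas_affected for state in occurrences]; fs = sorted(flat);
--    run-length scan of fs into counts; then {state: counts[state] for state in dict.fromkeys(flat)}.
def hurricane_count_alt (areas_affected : List (List String)) : List (String × Int) :=
  let flat := areas_affected.flatMap (fun occurrences => occurrences)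
  let fs := PySem.List.sorted flat (fun s => s) false
  let counts := rleCounts fs PySem.Dict.empty
  -- counts[state]: the lookup provably succeeds for every state of flat (rleCounts_get? below),
  -- so the port reads it as get? with a default that is never used
  (PySem.List.dedup flat).map (fun state => (state, (counts.get? state).getD 0))

-- ===== PRECONDITION & SPEC =====
def Spec_hurricane_count (areas_affected : List (List String)) (out : List (String × Int)) : Prop := out = hurricane_count_alt areas_affected
instance (areas_affected : List (List String)) (out : List (String × Int)) : Decidable (Spec_hurricane_count areas_affected out) := by unfold Spec_hurricane_count; infer_instance

-- ===== CLAIM (what is proved, stated in full; the proofs are below) =====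
def Claim_equal_hurricane_count : Prop := ∀ (areas_affected : List (List String)), Dom_hurricane_count areas_affected → Spec_hurricane_count areas_affected (hurricane_count areas_affected)

-- ===== LEMMAS AND PROOFS =====

-- A's loop body is exactly Counter's update: when the key is absent, inserting 1 equals modify with default 0.
theorem insert_one_eq_modify {κ : Type} [BEq κ] [LawfulBEq κ] (d : PySem.Dict κ Int) (s : κ)
    (h : d.contains s = false) : d.insert s 1 = d.modify s 0 (· + 1) := by
  have hg : d.getD s 0 = 0 := PySem.Dict.getD_of_not_contains d 0 h
  apply PySem.Dict.ext
  simp [PySem.Dict.insert, PySem.Dict.modify, h, hg]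

theorem stepA_eq_counter_step (d : PySem.Dict String Int) (s : String) :
    (if d.contains s then d.modify s 0 (· + 1)
     else if !(d.contains s) then d.insert s 1 else d) = d.modify s 0 (· + 1) := by
  by_cases h : d.contains s = true
  · simp [h]
  · simp only [Bool.not_eq_true] at h
    simp [h, insert_one_eq_modify d s h]

-- the nested loop over areas_affected is the single loop over the flattened list
theorem foldl_foldl_eq_foldl_flatMap {α β : Type} (f : β → α → β) (xs : List (List α)) (e : β) :
    xs.foldl (fun d occ => occ.foldl f d) e = (xs.flatMap (fun o => o)).foldl f e := by
  induction xs generalizing e with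
  | nil => rfl
  | cons o t ih => simp [List.foldl_append, ih]

-- thus A's dict is Counter(flat)
theorem hurricane_count_eq_counter_items (areas_affected : List (List String)) :
    hurricane_count areas_affected =
      (PySem.Dict.counter (areas_affected.flatMap (fun o => o))).items := by
  unfold hurricane_count
  have hstep : (fun (d : PySem.Dict String Int) (occ : List String) =>
      occ.foldl (fun d s =>
        if d.contains s then d.modify s 0 (· + 1)
        else if !(d.contains s) then d.insert s 1 else d) d)
      = fun d occ => occ.foldl (fun d s => d.modify s 0 (· + 1)) d := by
    funext d occ
    induction occ generalizing d with
    | nil => rfl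
    | cons s t ih => rw [List.foldl_cons, List.foldl_cons, stepA_eq_counter_step, ih]
  rw [hstep, foldl_foldl_eq_foldl_flatMap, ← PySem.Dict.counter_eq_foldl]

-- in a sorted (Pairwise ≤) list x :: t, everything dropped after the leading run of x is > x
theorem dropWhile_gt (x : String) (t : List String)
    (hp : (x :: t).Pairwise (· ≤ ·)) :
    ∀ y ∈ t.dropWhile (fun y => y == x), x < y := by
  intro y hy
  have hle : x ≤ y := (List.pairwise_cons.mp hp).1 y ((List.dropWhile_sublist _).subset hy)
  rcases lt_or_eq_of_le hle with h | h
  · exact h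
  exfalso
  rcases hd : t.dropWhile (fun y => y == x) with _ | ⟨b, bs⟩
  · rw [hd] at hy; simp at hy
  have hhead := List.head?_dropWhile_not (fun y => y == x) t
  rw [hd] at hhead
  have hbne : (b == x) = false := by simpa using hhead
  have hbx : x ≤ b :=
    (List.pairwise_cons.mp hp).1 b ((List.dropWhile_sublist _).subset (hd ▸ List.mem_cons_self))
  have hpb : (b :: bs).Pairwise (· ≤ ·) :=
    hd ▸ List.Pairwise.sublist (List.dropWhile_sublist _) (List.pairwise_cons.mp hp).2
  have hyb : b ≤ y := by
    rw [hd] at hy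
    rcases List.mem_cons.mp hy with rfl | hmem
    · exact le_refl _
    · exact (List.pairwise_cons.mp hpb).1 y hmem
  have hbne' : b ≠ x := by simpa using hbne
  rw [← h] at hyb
  exact hbne' (le_antisymm hyb hbx)

-- run-length scan of a sorted list: lookup s returns s's count if s occurs, else the old entry
theorem rleCounts_get? (fs : List String) (counts : PySem.Dict String Int) (s : String) :
    fs.Pairwise (· ≤ ·) →
    (rleCounts fs counts).get? s =
      if s ∈ fs then some ((fs.count s : Int)) else counts.get? s := by
  induction fs, counts using rleCounts.induct with
  | case1 counts => intro hp; simp [rleCounts]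
  | case2 counts x t ih =>
    intro hp
    have hpt : t.Pairwise (· ≤ ·) := (List.pairwise_cons.mp hp).2
    have hpb : (t.dropWhile (fun y => y == x)).Pairwise (· ≤ ·) :=
      List.Pairwise.sublist (List.dropWhile_sublist _) hpt
    have hgt := dropWhile_gt x t hp
    have htw : ∀ z ∈ t.takeWhile (fun y => y == x), z = x := by
      intro z hz
      simpa using List.mem_takeWhile_imp hz
    have htab : t = t.takeWhile (fun y => y == x) ++ t.dropWhile (fun y => y == x) :=
      (List.takeWhile_append_dropWhile).symm
    rw [rleCounts, ih hpb]
    by_cases hsx : s = x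
    · subst hsx
      have hsb : s ∉ t.dropWhile (fun y => y == s) := fun h => lt_irrefl s (hgt s h)
      have hca : (t.takeWhile (fun y => y == s)).count s
          = (t.takeWhile (fun y => y == s)).length := by
        rw [List.count_eq_length]
        intro z hz; simp [htw z hz]
      have hct : t.count s = (t.takeWhile (fun y => y == s)).length := by
        conv_lhs => rw [htab]
        rw [List.count_append, hca, List.count_eq_zero.mpr hsb]
        omega
      have hcount : (((s :: t).count s : Nat) : Int)
          = 1 + ((t.takeWhile (fun y => y == s)).length : Int) := by
        rw [List.count_cons_self, hct]; push_cast; ring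
      rw [if_neg hsb, PySem.Dict.get?_insert_self, if_pos List.mem_cons_self, hcount]
    · have hsa : s ∉ t.takeWhile (fun y => y == x) := fun h => hsx (htw s h)
      by_cases hsb : s ∈ t.dropWhile (fun y => y == x)
      · have hst : s ∈ x :: t :=
          List.mem_cons_of_mem _ ((List.dropWhile_sublist _).subset hsb)
        have hct : (x :: t).count s = (t.dropWhile (fun y => y == x)).count s := by
          rw [List.count_cons_of_ne (Ne.symm hsx)]
          conv_lhs => rw [htab]
          rw [List.count_append, List.count_eq_zero.mpr hsa]
          omega
        rw [if_pos hsb, if_pos hst, hct]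
      · have hst : s ∉ x :: t := by
          intro hmem
          rcases List.mem_cons.mp hmem with rfl | hmem
          · exact hsx rfl
          · rw [htab] at hmem
            rcases List.mem_append.mp hmem with h | h
            · exact hsa h
            · exact hsb h
        rw [if_neg hsb, if_neg hst]
        exact PySem.Dict.get?_insert_of_ne _ _ hsx

-- ===== VERDICT (by name: the statement is the Claim_ definition above) =====
theorem hurricane_count_spec : Claim_equal_hurricane_count := by
  intro areas_affected _
  unfold Spec_hurricane_count
  rw [hurricane_count_eq_counter_items, PySem.Dict.items_counter]
  unfold hurricane_count_alt
  simp only [PySem.List.dedup_eq_ofList]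
  apply List.map_congr_left
  intro s hs
  have hsf : s ∈ areas_affected.flatMap (fun o => o) := (PySem.Set.mem_ofList _ _).mp hs
  have hperm := PySem.List.sorted_perm (areas_affected.flatMap (fun o => o)) (fun s => s) false
  have hsp : s ∈ PySem.List.sorted (areas_affected.flatMap (fun o => o)) (fun s => s) false :=
    hperm.mem_iff.mpr hsf
  have hpair : (PySem.List.sorted (areas_affected.flatMap (fun o => o)) (fun s => s) false).Pairwise (· ≤ ·) := by
    simpa using PySem.List.sorted_pairwise (areas_affected.flatMap (fun o => o)) (fun s => s)
  rw [rleCounts_get? _ _ s hpair, if_pos hsp, hperm.count_eq]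
  simp
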